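-- pv_equiv track=rewrite | github.com/NEXTAltair/LoRAIro | src/lorairo/gui/workers/progress_helper.py | get_batch_boundaries
-- ===== SOURCE A (Python) =====
-- def get_batch_boundaries(total_items: int, batch_size: int) -> list[tuple[int, int]]:
--     """バッチ境界の計算
--
--     Args:
--         total_items: 総アイテム数
--         batch_size: バッチサイズ
--
--     Returns:
--         (start_idx, end_idx) のタプルリスト
--     """
--     if total_items == 0 or batch_size <= 0:
--         return []
--
--     boundaries = []
--     for start_idx in range(0, total_items, batch_size):
--         end_idx = min(start_idx + batch_size, total_items)
--         boundaries.append((start_idx, end_idx))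
--     return boundaries
-- ===== SOURCE B (Python) =====
-- def get_batch_boundaries(total_items: int, batch_size: int) -> list[tuple[int, int]]:
--     if total_items <= 0 or batch_size <= 0:
--         return []
--     full, rem = divmod(total_items, batch_size)
--     boundaries = [(i * batch_size, (i + 1) * batch_size) for i in range(full)]
--     if rem:
--         boundaries.append((full * batch_size, total_items))
--     return boundaries
-- ===== Notes on version B (the rewrite author's own statement) =====
-- stated objective: alternative
-- what changed: Instead of scanning range(0,total,step) and capping each end with min(), B computes the number of full batches and the remainder once with divmod, produces each full batch boundary by the closed-form index arithmetic (i*b,(i+1)*b), and appends one final partial batch only when the remainder is nonzero.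
import Mathlib
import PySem

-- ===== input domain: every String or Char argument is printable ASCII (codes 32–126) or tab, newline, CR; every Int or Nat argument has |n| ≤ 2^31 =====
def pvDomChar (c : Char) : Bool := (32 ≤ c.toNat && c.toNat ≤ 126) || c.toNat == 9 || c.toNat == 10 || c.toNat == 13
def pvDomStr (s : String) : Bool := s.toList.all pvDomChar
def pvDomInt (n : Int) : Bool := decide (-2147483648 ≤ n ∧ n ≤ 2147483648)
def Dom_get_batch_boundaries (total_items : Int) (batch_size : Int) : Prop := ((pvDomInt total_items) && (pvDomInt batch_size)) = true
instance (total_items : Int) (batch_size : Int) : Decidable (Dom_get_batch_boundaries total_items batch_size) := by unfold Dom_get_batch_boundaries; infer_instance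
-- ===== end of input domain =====

-- B replaces A's range-scan with a per-iteration min() cap by one divmod: the full
-- batches come from closed-form index arithmetic and the single partial batch is
-- appended only when the remainder is nonzero (objective: alternative).

-- ===== PORT A =====
def get_batch_boundaries (total_items : Int) (batch_size : Int) : List (Int × Int) :=
  if total_items = 0 ∨ batch_size ≤ 0 then []
  else
    (PySem.List.pyRange 0 total_items batch_size).foldl
      (fun boundaries start_idx =>
        boundaries ++ [(start_idx, min (start_idx + batch_size) total_items)]) []

-- ===== PORT B =====
def get_batch_boundaries_alt (total_items : Int) (batch_size : Int) : List (Int × Int) :=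
  if total_items ≤ 0 ∨ batch_size ≤ 0 then []
  else
    let full := PySem.Int.floordiv total_items batch_size
    let rem := PySem.Int.mod total_items batch_size
    let boundaries := (List.range full.toNat).map
      (fun (i : Nat) => ((i : Int) * batch_size, ((i : Int) + 1) * batch_size))
    if rem ≠ 0 then boundaries ++ [(full * batch_size, total_items)] else boundaries

-- ===== PRECONDITION & SPEC =====
def Spec_get_batch_boundaries (total_items : Int) (batch_size : Int) (out : List (Int × Int)) : Prop := out = get_batch_boundaries_alt total_items batch_size
instance (total_items : Int) (batch_size : Int) (out : List (Int × Int)) : Decidable (Spec_get_batch_boundaries total_items batch_size out) := by unfold Spec_get_batch_boundaries; infer_instance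

-- ===== CLAIM (what is proved, stated in full; the proofs are below) =====
def Claim_equal_get_batch_boundaries : Prop := ∀ (total_items : Int) (batch_size : Int), Dom_get_batch_boundaries total_items batch_size → Spec_get_batch_boundaries total_items batch_size (get_batch_boundaries total_items batch_size)

-- ===== LEMMAS AND PROOFS =====

theorem pvFoldlAppend (l : List Int) (f : Int → Int × Int) (init : List (Int × Int)) :
    l.foldl (fun acc x => acc ++ [f x]) init = init ++ l.map f := by
  induction l generalizing init with
  | nil => simp
  | cons x xs ih => simp [List.foldl_cons, ih]

theorem pvRangePos (a b s : Int) (hs : 0 < s) :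
    PySem.List.pyRange a b s
      = if a < b then (List.range ((b - a + s - 1) / s).toNat).map (fun (k : Nat) => a + s * (k : Int))
        else [] := by
  rw [PySem.List.pyRange_of_pos _ _ hs]
  by_cases h : a < b <;> simp [h]

-- ===== VERDICT (by name: the statement is the Claim_ definition above) =====
theorem get_batch_boundaries_spec : Claim_equal_get_batch_boundaries := by
  intro t bs _
  unfold Spec_get_batch_boundaries get_batch_boundaries get_batch_boundaries_alt
  by_cases hbs : bs ≤ 0
  · rw [if_pos (Or.inr hbs), if_pos (Or.inr hbs)]
  · have hbs' : 0 < bs := by omega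
    by_cases ht : t ≤ 0
    · rw [if_pos (Or.inl ht)]
      by_cases ht0 : t = 0
      · rw [if_pos (Or.inl ht0)]
      · rw [if_neg (by omega), pvRangePos _ _ _ hbs', if_neg (by omega)]
        simp
    · rw [if_neg (by omega), if_neg (by omega)]
      have ht' : 0 < t := by omega
      rw [pvFoldlAppend, List.nil_append, pvRangePos _ _ _ hbs', if_pos ht']
      rw [PySem.Int.floordiv_eq_ediv_of_pos hbs', PySem.Int.mod_eq_emod_of_pos hbs']
      rw [List.map_map]
      set q := t / bs with hq
      set r := t % bs with hr
      have hqr : bs * q + r = t := Int.mul_ediv_add_emod t bs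
      have hr0 : 0 ≤ r := Int.emod_nonneg t (by omega)
      have hrlt : r < bs := Int.emod_lt_of_pos t hbs'
      have hq0 : 0 ≤ q := Int.ediv_nonneg (by omega) (by omega)
      have hsplit : t - 0 + bs - 1 = (r + bs - 1) + bs * q := by omega
      have hcnt : (t - 0 + bs - 1) / bs = (r + bs - 1) / bs + q := by
        rw [hsplit, Int.add_mul_ediv_left _ _ (show bs ≠ 0 by omega)]
      by_cases hrz : r = 0
      · have hcq : (t - 0 + bs - 1) / bs = q := by
          rw [hcnt, hrz, Int.ediv_eq_zero_of_lt (by omega) (by omega), zero_add]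
        rw [hcq, if_neg (by simp [hrz])]
        apply List.map_congr_left
        intro k hk
        have hk' : (k : Int) < q := by
          rw [List.mem_range] at hk; omega
        have hle : ((k : Int) + 1) * bs ≤ t := by
          have := mul_le_mul_of_nonneg_right (show (k : Int) + 1 ≤ q by omega) (le_of_lt hbs')
          nlinarith
        simp only [Function.comp_apply, zero_add]
        rw [min_eq_left (by linarith [hle] : bs * (k : Int) + bs ≤ t), Prod.mk.injEq]
        constructor <;> ring
      · have h1 : (r + bs - 1) / bs = 1 := by
          have h2 : r + bs - 1 = (r - 1) + 1 * bs := by ring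
          rw [h2, Int.add_mul_ediv_right _ _ (show bs ≠ 0 by omega),
            Int.ediv_eq_zero_of_lt (by omega) (by omega)]
          norm_num
        have hcq : (t - 0 + bs - 1) / bs = q + 1 := by rw [hcnt, h1]; ring
        have hcq' : ((t - 0 + bs - 1) / bs).toNat = q.toNat + 1 := by omega
        rw [hcq', if_pos hrz, List.range_succ, List.map_append]
        refine congrArg₂ _ ?_ ?_
        · apply List.map_congr_left
          intro k hk
          have hk' : (k : Int) < q := by
            rw [List.mem_range] at hk; omega
          have hle : ((k : Int) + 1) * bs ≤ t := by
            have := mul_le_mul_of_nonneg_right (show (k : Int) + 1 ≤ q by omega) (le_of_lt hbs')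
            nlinarith
          simp only [Function.comp_apply, zero_add]
          rw [min_eq_left (by linarith [hle] : bs * (k : Int) + bs ≤ t), Prod.mk.injEq]
          constructor <;> ring
        · have hqn : ((q.toNat : Int)) = q := by omega
          simp only [Function.comp_apply, List.map_cons, List.map_nil, hqn, zero_add]
          have hmin : min (bs * q + bs) t = t := by omega
          rw [hmin, mul_comm bs q]
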